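-- pv_equiv track=rewrite | github.com/shandrayu/aoc-2020 | day07/python/day07.py | count_possible_colors
-- ===== SOURCE A (Python) =====
-- from collections import deque
--
-- def count_possible_colors(color: str, rules: dict) -> int:
--     count = 0
--     queue = deque([color])
--     counted_colors = set()
--     # Will work if there no recursion in bags :)
--     while queue:
--         current_color = queue.popleft()
--         for color, bags_inside in rules.items():
--             if current_color in bags_inside and color not in counted_colors:
--                 count += 1
--                 queue.append(color)
--                 counted_colors.add(color)
--     return count
-- ===== SOURCE B (Python) =====
-- def count_possible_colors(color: str, rules: dict) -> int:
--     # Reverse-containment index: rev[inner] = list of outer colors whose bag holds inner.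
--     rev = {}
--     for outer, bags_inside in rules.items():
--         for inner in bags_inside:
--             rev.setdefault(inner, []).append(outer)
--     visited = set()
--     stack = [color]
--     while stack:
--         u = stack.pop()
--         for v in rev.get(u, []):
--             if v not in visited:
--                 visited.add(v)
--                 stack.append(v)
--     return len(visited)
-- ===== Notes on version B (the rewrite author's own statement) =====
-- stated objective: alternative
-- what changed: A rescans the whole rules mapping once per dequeued color; B instead builds a reverse-containment adjacency index once and runs a single stack-based reachability traversal over that index.
import Mathlib
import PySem

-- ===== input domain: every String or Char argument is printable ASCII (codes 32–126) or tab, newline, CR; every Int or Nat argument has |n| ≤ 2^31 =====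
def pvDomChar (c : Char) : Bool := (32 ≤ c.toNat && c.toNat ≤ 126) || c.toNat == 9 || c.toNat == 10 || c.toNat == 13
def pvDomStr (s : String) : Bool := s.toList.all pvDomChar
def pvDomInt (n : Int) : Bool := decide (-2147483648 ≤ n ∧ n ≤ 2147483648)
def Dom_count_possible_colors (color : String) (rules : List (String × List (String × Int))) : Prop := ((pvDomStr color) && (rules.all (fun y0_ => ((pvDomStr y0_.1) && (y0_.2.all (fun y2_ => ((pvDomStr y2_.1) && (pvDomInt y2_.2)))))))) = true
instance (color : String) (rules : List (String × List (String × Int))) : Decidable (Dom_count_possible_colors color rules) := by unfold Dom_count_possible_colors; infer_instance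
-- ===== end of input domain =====

-- B replaces A's rescan of ALL rules per dequeued color by a reverse-containment
-- index built once, then a single stack-based reachability traversal (objective: alternative).

-- ===== PORT A =====
-- inner 'for color, bags_inside in rules.items():' body; state = (count, queue-tail, counted_colors)
def pvAInner (current : String) (acc : Int × List String × PySem.Set String)
    (rule : String × List (String × Int)) : Int × List String × PySem.Set String :=
  if (rule.2.map Prod.fst).contains current && !(PySem.Set.contains acc.2.2 rule.1) then
    (acc.1 + 1, acc.2.1 ++ [rule.1], PySem.Set.add acc.2.2 rule.1)
  else acc

-- 'while queue:' loop; fuel bounds the iteration count (proved sufficient below: each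
-- iteration pops one element, and pushes only newly counted distinct rule keys)
def pvALoop (rules : List (String × List (String × Int))) :
    Nat → List String → Int → PySem.Set String → Int
  | 0, _, count, _ => count
  | _ + 1, [], count, _ => count
  | fuel + 1, cur :: rest, count, counted =>
      let s := rules.foldl (pvAInner cur) (count, rest, counted)
      pvALoop rules fuel s.2.1 s.1 s.2.2

def count_possible_colors (color : String) (rules : List (String × List (String × Int))) : Int :=
  pvALoop rules (rules.length + 1) [color] 0 PySem.Set.empty

-- ===== PORT B =====
-- rev.setdefault(inner, []).append(outer)  ==  rev[inner] = rev.get(inner, []) + [outer]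
def pvBRev (rules : List (String × List (String × Int))) : PySem.Dict String (List String) :=
  rules.foldl
    (fun d r => r.2.foldl (fun d q => d.modify q.1 [] (fun l => l ++ [r.1])) d)
    PySem.Dict.empty

-- 'for v in rev.get(u, []):' body; state = (stack-without-u, visited)
def pvBStep (acc : List String × PySem.Set String) (v : String) :
    List String × PySem.Set String :=
  if PySem.Set.contains acc.2 v then acc
  else (acc.1 ++ [v], PySem.Set.add acc.2 v)

-- 'while stack:' loop; stack.pop() takes the LAST element; fuel proved sufficient below
def pvBLoop (rev : PySem.Dict String (List String)) :
    Nat → List String → PySem.Set String → Int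
  | 0, _, visited => PySem.Set.len visited
  | fuel + 1, stack, visited =>
    if h : stack = [] then PySem.Set.len visited
    else
      let u := stack.getLast h
      let s := (rev.getD u []).foldl pvBStep (stack.dropLast, visited)
      pvBLoop rev fuel s.1 s.2

def count_possible_colors_alt (color : String) (rules : List (String × List (String × Int))) : Int :=
  pvBLoop (pvBRev rules) (rules.length + 1) [color] PySem.Set.empty

-- ===== PRECONDITION & SPEC =====
def Spec_count_possible_colors (color : String) (rules : List (String × List (String × Int))) (out : Int) : Prop := out = count_possible_colors_alt color rules
instance (color : String) (rules : List (String × List (String × Int))) (out : Int) : Decidable (Spec_count_possible_colors color rules out) := by unfold Spec_count_possible_colors; infer_instance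

-- ===== CLAIM (what is proved, stated in full; the proofs are below) =====
def Claim_equal_count_possible_colors : Prop := ∀ (color : String) (rules : List (String × List (String × Int))), Dom_count_possible_colors color rules → Spec_count_possible_colors color rules (count_possible_colors color rules)

-- ===== LEMMAS AND PROOFS =====

-- 'c's bag (some rule named c) contains u' — the reverse edge u → c
def pvEdge (rules : List (String × List (String × Int))) (u c : String) : Prop :=
  ∃ r ∈ rules, r.1 = c ∧ ∃ q ∈ r.2, q.1 = u

-- colors from which `start` is reachable by ≥ 1 reverse edge (what A counts)
inductive pvReach (rules : List (String × List (String × Int))) (start : String) : String → Prop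
  | base (c : String) : pvEdge rules start c → pvReach rules start c
  | step (u c : String) : pvReach rules start u → pvEdge rules u c → pvReach rules start c

-- a single step-from-(start or reached) rule, packaging the two constructors
lemma pvReach_mk (rules : List (String × List (String × Int))) (start u c : String)
    (hu : u = start ∨ pvReach rules start u) (he : pvEdge rules u c) :
    pvReach rules start c := by
  rcases hu with rfl | h
  · exact pvReach.base c he
  · exact pvReach.step u c h he

-- a closed counted-set containing start's out-neighbourhood closure contains all of pvReach
lemma pvReach_subset_of_closed (rules : List (String × List (String × Int))) (start : String)
    (counted : List String)
    (hclosed : ∀ u c, pvEdge rules u c → (u = start ∨ u ∈ counted) → c ∈ counted) :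
    ∀ c, pvReach rules start c → c ∈ counted := by
  intro c h
  induction h with
  | base c he => exact hclosed start c he (Or.inl rfl)
  | step u c _ he ih => exact hclosed u c he (Or.inr ih)

lemma pvAInner_foldl_spec (current : String) :
    ∀ (rs : List (String × List (String × Int))) (count : Int) (rest counted : List String),
    counted.Nodup →
    ∃ new : List String,
      rs.foldl (pvAInner current) (count, rest, counted)
        = (count + new.length, rest ++ new, counted ++ new)
      ∧ (counted ++ new).Nodup
      ∧ (∀ c ∈ new, ∃ r ∈ rs, r.1 = c ∧ ∃ q ∈ r.2, q.1 = current)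
      ∧ (∀ r ∈ rs, (∃ q ∈ r.2, q.1 = current) → r.1 ∈ counted ++ new) := by
  intro rs
  induction rs with
  | nil =>
      intro count rest counted hnd
      exact ⟨[], by simp, by simpa using hnd, by simp, by simp⟩
  | cons r rs ih =>
      intro count rest counted hnd
      by_cases hcond : ((r.2.map Prod.fst).contains current
          && !(PySem.Set.contains counted r.1)) = true
      · -- the head rule fires: r.1 is newly counted
        have hmem : ∃ q ∈ r.2, q.1 = current := by
          rcases Bool.and_eq_true_iff.mp hcond with ⟨h1, _⟩
          rcases List.mem_map.mp (List.contains_iff_mem.mp h1) with ⟨q, hq, hq1⟩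
          exact ⟨q, hq, hq1⟩
        have hnotc : r.1 ∉ counted := by
          rcases Bool.and_eq_true_iff.mp hcond with ⟨_, h2⟩
          intro hc
          rw [(PySem.Set.contains_iff counted r.1).mpr hc] at h2
          simp at h2
        have hnd' : (counted ++ [r.1]).Nodup :=
          hnd.append (List.nodup_singleton _)
            (fun a ha hb => hnotc ((List.mem_singleton.mp hb) ▸ ha))
        rcases ih (count + 1) (rest ++ [r.1]) (counted ++ [r.1]) hnd'
          with ⟨new, heq, hnd2, hedge, hcomp⟩
        have hstep : pvAInner current (count, rest, counted) r
            = (count + 1, rest ++ [r.1], PySem.Set.add counted r.1) := by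
          simp only [pvAInner]
          rw [if_pos hcond]
        refine ⟨r.1 :: new, ?_, ?_, ?_, ?_⟩
        · rw [List.foldl_cons, hstep, PySem.Set.add_of_not_mem hnotc, heq]
          simp only [Prod.mk.injEq]
          refine ⟨by push_cast [List.length_cons]; ring, by simp, by simp⟩
        · simpa using hnd2
        · intro c hc
          rcases List.mem_cons.mp hc with rfl | hc
          · exact ⟨r, by simp, rfl, hmem⟩
          · rcases hedge c hc with ⟨r', hr', h1, h2⟩
            exact ⟨r', by simp [hr'], h1, h2⟩
        · intro r' hr' hq
          rcases List.mem_cons.mp hr' with rfl | hr'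
          · simp
          · have := hcomp r' hr' hq
            simpa using this
      · -- the head rule does not fire
        have hstep : pvAInner current (count, rest, counted) r = (count, rest, counted) := by
          simp only [pvAInner]
          rw [if_neg hcond]
        rcases ih count rest counted hnd with ⟨new, heq, hnd2, hedge, hcomp⟩
        have heqall : (r :: rs).foldl (pvAInner current) (count, rest, counted)
            = (count + new.length, rest ++ new, counted ++ new) := by
          rw [List.foldl_cons, hstep, heq]
        refine ⟨new, heqall, hnd2, ?_, ?_⟩
        · intro c hc
          rcases hedge c hc with ⟨r', hr', h1, h2⟩
          exact ⟨r', by simp [hr'], h1, h2⟩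
        · intro r' hr' hq
          rcases List.mem_cons.mp hr' with h | h
          · -- head rule with current in its bag but guard false ⇒ its key is already counted
            subst h
            have h1 : (r'.2.map Prod.fst).contains current = true := by
              rcases hq with ⟨q, hq, hq1⟩
              exact List.contains_iff_mem.mpr (List.mem_map.mpr ⟨q, hq, hq1⟩)
            have h2 : r'.1 ∈ counted := by
              by_contra hc
              have h3 : PySem.Set.contains counted r'.1 = false := by
                rcases h : PySem.Set.contains counted r'.1 with _ | _
                · rfl
                · exact absurd (PySem.Set.contains_iff _ _ |>.mp h) hc
              exact hcond (by rw [h1, h3]; rfl)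
            exact List.mem_append.mpr (Or.inl h2)
          · exact hcomp r' h hq

-- the measure bookkeeping shared by both loops
lemma pv_measure_step (keys : Finset String) (counted new : List String)
    (hnd : (counted ++ new).Nodup)
    (hsub : ∀ c ∈ new, c ∈ keys) :
    (keys \ (counted ++ new).toFinset).card + new.length
      = (keys \ counted.toFinset).card := by
  have hndnew : new.Nodup := (List.nodup_append.mp hnd).2.1
  have hdisj : ∀ c ∈ new, c ∉ counted := by
    intro c hc hcc
    exact (List.nodup_append.mp hnd).2.2 c hcc c hc rfl
  have hsub2 : new.toFinset ⊆ keys \ counted.toFinset := by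
    intro c hc
    rw [List.mem_toFinset] at hc
    exact Finset.mem_sdiff.mpr ⟨hsub c hc, by simpa using hdisj c hc⟩
  have h1 : keys \ (counted ++ new).toFinset = (keys \ counted.toFinset) \ new.toFinset := by
    rw [List.toFinset_append, Finset.sdiff_union_distrib]
    ext x
    simp [Finset.mem_sdiff]
    tauto
  rw [h1, Finset.card_sdiff, Finset.inter_eq_left.mpr hsub2,
    List.toFinset_card_of_nodup hndnew]
  have := Finset.card_le_card hsub2
  rw [List.toFinset_card_of_nodup hndnew] at this
  omega

lemma pvALoop_spec (rules : List (String × List (String × Int))) (start : String) :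
    ∀ (fuel : Nat) (queue : List String) (count : Int) (counted : List String),
    queue.length + ((rules.map Prod.fst).toFinset \ counted.toFinset).card ≤ fuel →
    counted.Nodup →
    (∀ c ∈ counted, pvReach rules start c) →
    (∀ c ∈ queue, c = start ∨ c ∈ counted) →
    (∀ u c, pvEdge rules u c → (u = start ∨ u ∈ counted) → c ∈ counted ∨ u ∈ queue) →
    count = (counted.length : Int) →
    ∃ C : List String, pvALoop rules fuel queue count counted = (C.length : Int)
      ∧ C.Nodup ∧ ∀ c, (c ∈ C ↔ pvReach rules start c) := by
  intro fuel
  induction fuel with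
  | zero =>
      intro queue count counted hfuel hnd hsound hq hclosed hcount
      have hqe : queue = [] := by
        cases queue with
        | nil => rfl
        | cons a l => simp at hfuel
      subst hqe
      refine ⟨counted, by simp [pvALoop, hcount], hnd, fun c => ⟨hsound c, ?_⟩⟩
      exact fun h => pvReach_subset_of_closed rules start counted
        (fun u c he hu => (hclosed u c he hu).resolve_right (by simp)) c h
  | succ fuel ih =>
      intro queue count counted hfuel hnd hsound hq hclosed hcount
      cases queue with
      | nil =>
          refine ⟨counted, by simp [pvALoop, hcount], hnd, fun c => ⟨hsound c, ?_⟩⟩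
          exact fun h => pvReach_subset_of_closed rules start counted
            (fun u c he hu => (hclosed u c he hu).resolve_right (by simp)) c h
      | cons cur rest =>
          rcases pvAInner_foldl_spec cur rules count rest counted hnd
            with ⟨new, heq, hnd2, hedge, hcomp⟩
          have hstep : pvALoop rules (fuel + 1) (cur :: rest) count counted
              = pvALoop rules fuel (rest ++ new) (count + new.length) (counted ++ new) := by
            show pvALoop rules fuel _ _ _ = _
            rw [heq]
          rw [hstep]
          have hnew_keys : ∀ c ∈ new, c ∈ (rules.map Prod.fst).toFinset := by
            intro c hc
            rcases hedge c hc with ⟨r, hr, h1, _⟩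
            exact List.mem_toFinset.mpr (List.mem_map.mpr ⟨r, hr, h1⟩)
          have hmeas := pv_measure_step (rules.map Prod.fst).toFinset counted new hnd2 hnew_keys
          apply ih
          · simp only [List.length_append]
            simp only [List.length_cons] at hfuel
            omega
          · exact hnd2
          · -- soundness of counted ++ new
            intro c hc
            rcases List.mem_append.mp hc with hc | hc
            · exact hsound c hc
            · rcases hedge c hc with ⟨r, hr, h1, hq'⟩
              have he : pvEdge rules cur c := ⟨r, hr, h1, hq'⟩
              rcases hq cur (by simp) with h | h
              · exact pvReach_mk rules start cur c (Or.inl h) he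
              · exact pvReach_mk rules start cur c (Or.inr (hsound cur h)) he
          · -- queue invariant
            intro c hc
            rcases List.mem_append.mp hc with hc | hc
            · rcases hq c (by simp [hc]) with h | h
              · exact Or.inl h
              · exact Or.inr (List.mem_append.mpr (Or.inl h))
            · exact Or.inr (List.mem_append.mpr (Or.inr hc))
          · -- closedness
            intro u c he hu
            by_cases hucur : u = cur
            · subst hucur
              rcases he with ⟨r, hr, h1, hq'⟩
              exact Or.inl (h1 ▸ hcomp r hr hq')
            · rcases hu with h | h
              · rcases hclosed u c he (Or.inl h) with h2 | h2
                · exact Or.inl (List.mem_append.mpr (Or.inl h2))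
                · rcases List.mem_cons.mp h2 with h3 | h3
                  · exact absurd h3 hucur
                  · exact Or.inr (List.mem_append.mpr (Or.inl h3))
              · rcases List.mem_append.mp h with h | h
                · rcases hclosed u c he (Or.inr h) with h2 | h2
                  · exact Or.inl (List.mem_append.mpr (Or.inl h2))
                  · rcases List.mem_cons.mp h2 with h3 | h3
                    · exact absurd h3 hucur
                    · exact Or.inr (List.mem_append.mpr (Or.inl h3))
                · exact Or.inr (List.mem_append.mpr (Or.inr h))
          · simp [hcount]

-- ---- B side ----

lemma pvBRev_getD (rules : List (String × List (String × Int))) (u : String) :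
    (pvBRev rules).getD u []
      = ((rules.flatMap (fun r => r.2.map (fun q => (q.1, r.1)))).filter
          (fun p => p.1 == u)).map (fun p => p.2) := by
  have h : ∀ (rs : List (String × List (String × Int))) (d : PySem.Dict String (List String)),
      rs.foldl (fun d r => r.2.foldl (fun d q => d.modify q.1 [] (fun l => l ++ [r.1])) d) d
        = (rs.flatMap (fun r => r.2.map (fun q => (q.1, r.1)))).foldl
            (fun d p => d.modify p.1 [] (fun l => l ++ [p.2])) d := by
    intro rs
    induction rs with
    | nil => intro d; rfl
    | cons r rs ih =>
        intro d
        rw [List.foldl_cons, ih, List.flatMap_cons, List.foldl_append, List.foldl_map]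
  rw [pvBRev, h, PySem.Dict.getD_foldl_modify_append, PySem.Dict.getD_empty]
  simp

lemma mem_pvBRev_getD (rules : List (String × List (String × Int))) (u c : String) :
    c ∈ (pvBRev rules).getD u [] ↔ pvEdge rules u c := by
  rw [pvBRev_getD]
  simp only [List.mem_map, List.mem_filter, List.mem_flatMap, pvEdge]
  constructor
  · rintro ⟨p, ⟨⟨r, hr, q, hq, rfl⟩, hpu⟩, rfl⟩
    exact ⟨r, hr, rfl, q, hq, by simpa using hpu⟩
  · rintro ⟨r, hr, rfl, q, hq, rfl⟩
    exact ⟨(q.1, r.1), ⟨⟨r, hr, q, hq, rfl⟩, by simp⟩, rfl⟩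

lemma pvBStep_foldl_spec :
    ∀ (ns rest visited : List String),
    visited.Nodup →
    ∃ new : List String,
      ns.foldl pvBStep (rest, visited) = (rest ++ new, visited ++ new)
      ∧ (visited ++ new).Nodup
      ∧ (∀ c ∈ new, c ∈ ns)
      ∧ (∀ c ∈ ns, c ∈ visited ++ new) := by
  intro ns
  induction ns with
  | nil =>
      intro rest visited hnd
      exact ⟨[], by simp, by simpa using hnd, by simp, by simp⟩
  | cons n ns ih =>
      intro rest visited hnd
      by_cases hmem : n ∈ visited
      · have hstep : pvBStep (rest, visited) n = (rest, visited) := by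
          simp only [pvBStep]
          rw [if_pos ((PySem.Set.contains_iff visited n).mpr hmem)]
        rcases ih rest visited hnd with ⟨new, heq, hnd2, hsub, hcomp⟩
        refine ⟨new, by rw [List.foldl_cons, hstep, heq], hnd2,
          fun c hc => by simp [hsub c hc], ?_⟩
        intro c hc
        rcases List.mem_cons.mp hc with rfl | hc
        · exact List.mem_append.mpr (Or.inl hmem)
        · exact hcomp c hc
      · have hcf : PySem.Set.contains visited n = false := by
          rcases h : PySem.Set.contains visited n with _ | _
          · rfl
          · exact absurd (PySem.Set.contains_iff _ _ |>.mp h) hmem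
        have hstep : pvBStep (rest, visited) n = (rest ++ [n], visited ++ [n]) := by
          simp only [pvBStep]
          rw [if_neg (by rw [hcf]; simp), PySem.Set.add_of_not_mem hmem]
        have hnd' : (visited ++ [n]).Nodup :=
          hnd.append (List.nodup_singleton _)
            (fun a ha hb => hmem ((List.mem_singleton.mp hb) ▸ ha))
        rcases ih (rest ++ [n]) (visited ++ [n]) hnd' with ⟨new, heq, hnd2, hsub, hcomp⟩
        refine ⟨n :: new, ?_, by simpa using hnd2, ?_, ?_⟩
        · rw [List.foldl_cons, hstep, heq]; simp
        · intro c hc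
          rcases List.mem_cons.mp hc with rfl | hc
          · simp
          · simp [hsub c hc]
        · intro c hc
          rcases List.mem_cons.mp hc with rfl | hc
          · simp
          · have := hcomp c hc
            simpa using this

lemma pvBLoop_spec (rules : List (String × List (String × Int))) (start : String) :
    ∀ (fuel : Nat) (stack visited : List String),
    stack.length + ((rules.map Prod.fst).toFinset \ visited.toFinset).card ≤ fuel →
    visited.Nodup →
    (∀ c ∈ visited, pvReach rules start c) →
    (∀ c ∈ stack, c = start ∨ c ∈ visited) →
    (∀ u c, pvEdge rules u c → (u = start ∨ u ∈ visited) → c ∈ visited ∨ u ∈ stack) →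
    ∃ C : List String, pvBLoop (pvBRev rules) fuel stack visited = (C.length : Int)
      ∧ C.Nodup ∧ ∀ c, (c ∈ C ↔ pvReach rules start c) := by
  intro fuel
  induction fuel with
  | zero =>
      intro stack visited hfuel hnd hsound hs hclosed
      have hse : stack = [] := by
        cases stack with
        | nil => rfl
        | cons a l => simp at hfuel
      subst hse
      refine ⟨visited, by simp [pvBLoop, PySem.Set.len], hnd, fun c => ⟨hsound c, ?_⟩⟩
      exact fun h => pvReach_subset_of_closed rules start visited
        (fun u c he hu => (hclosed u c he hu).resolve_right (by simp)) c h
  | succ fuel ih =>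
      intro stack visited hfuel hnd hsound hs hclosed
      rcases List.eq_nil_or_concat stack with rfl | ⟨ys, y, rfl⟩
      · refine ⟨visited, by simp [pvBLoop, PySem.Set.len], hnd, fun c => ⟨hsound c, ?_⟩⟩
        exact fun h => pvReach_subset_of_closed rules start visited
          (fun u c he hu => (hclosed u c he hu).resolve_right (by simp)) c h
      · simp only [List.concat_eq_append] at hfuel hs hclosed ⊢
        have hne : ys ++ [y] ≠ [] := by simp
        rcases pvBStep_foldl_spec ((pvBRev rules).getD y []) ys visited hnd
          with ⟨new, heq, hnd2, hsub, hcomp⟩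
        have hstep : pvBLoop (pvBRev rules) (fuel + 1) (ys ++ [y]) visited
            = pvBLoop (pvBRev rules) fuel (ys ++ new) (visited ++ new) := by
          rw [pvBLoop, dif_neg hne]
          simp only [List.getLast_concat, List.dropLast_concat]
          rw [heq]
        rw [hstep]
        have hedge : ∀ c ∈ new, pvEdge rules y c := by
          intro c hc
          exact (mem_pvBRev_getD rules y c).mp (hsub c hc)
        have hnew_keys : ∀ c ∈ new, c ∈ (rules.map Prod.fst).toFinset := by
          intro c hc
          rcases hedge c hc with ⟨r, hr, h1, _⟩
          exact List.mem_toFinset.mpr (List.mem_map.mpr ⟨r, hr, h1⟩)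
        have hmeas := pv_measure_step (rules.map Prod.fst).toFinset visited new hnd2 hnew_keys
        apply ih
        · simp only [List.length_append]
          simp only [List.length_append, List.length_cons] at hfuel
          omega
        · exact hnd2
        · intro c hc
          rcases List.mem_append.mp hc with hc | hc
          · exact hsound c hc
          · rcases hs y (by simp) with h | h
            · exact pvReach_mk rules start y c (Or.inl h) (hedge c hc)
            · exact pvReach_mk rules start y c (Or.inr (hsound y h)) (hedge c hc)
        · intro c hc
          rcases List.mem_append.mp hc with hc | hc
          · rcases hs c (by simp [hc]) with h | h
            · exact Or.inl h
            · exact Or.inr (List.mem_append.mpr (Or.inl h))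
          · exact Or.inr (List.mem_append.mpr (Or.inr hc))
        · intro u c he hu
          by_cases huy : u = y
          · subst huy
            exact Or.inl (hcomp c ((mem_pvBRev_getD rules u c).mpr he))
          · have hrest : ∀ h2 : u ∈ ys ++ [y], u ∈ ys ++ new := by
              intro h2
              rcases List.mem_append.mp h2 with h3 | h3
              · exact List.mem_append.mpr (Or.inl h3)
              · exact absurd (by simpa using h3) huy
            rcases hu with h | h
            · rcases hclosed u c he (Or.inl h) with h2 | h2
              · exact Or.inl (List.mem_append.mpr (Or.inl h2))
              · exact Or.inr (hrest h2)
            · rcases List.mem_append.mp h with h | h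
              · rcases hclosed u c he (Or.inr h) with h2 | h2
                · exact Or.inl (List.mem_append.mpr (Or.inl h2))
                · exact Or.inr (hrest h2)
              · exact Or.inr (List.mem_append.mpr (Or.inr h))

-- ===== VERDICT (by name: the statement is the Claim_ definition above) =====
theorem count_possible_colors_spec : Claim_equal_count_possible_colors := by
  intro color rules _
  unfold Spec_count_possible_colors count_possible_colors count_possible_colors_alt
  have hfuel : 1 + ((rules.map Prod.fst).toFinset \ ([] : List String).toFinset).card
      ≤ rules.length + 1 := by
    have := List.toFinset_card_le (rules.map Prod.fst)
    simp only [List.toFinset_nil, Finset.sdiff_empty]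
    simp only [List.length_map] at this
    omega
  have hclosed0 : ∀ u c, pvEdge rules u c → (u = color ∨ u ∈ ([] : List String)) →
      c ∈ ([] : List String) ∨ u ∈ [color] := by
    intro u c _ hu
    rcases hu with rfl | h
    · exact Or.inr (by simp)
    · simp at h
  rcases pvALoop_spec rules color (rules.length + 1) [color] 0 []
      (by simpa using hfuel) (by simp) (by simp) (by simp) hclosed0 (by simp)
    with ⟨C1, h1, hnd1, hm1⟩
  rcases pvBLoop_spec rules color (rules.length + 1) [color] []
      (by simpa using hfuel) (by simp) (by simp) (by simp) hclosed0
    with ⟨C2, h2, hnd2, hm2⟩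
  have hperm : C1.Perm C2 :=
    (List.perm_ext_iff_of_nodup hnd1 hnd2).mpr
      (fun a => (hm1 a).trans (hm2 a).symm)
  show pvALoop rules (rules.length + 1) [color] 0 PySem.Set.empty
      = pvBLoop (pvBRev rules) (rules.length + 1) [color] PySem.Set.empty
  have he : (PySem.Set.empty : PySem.Set String) = ([] : List String) := rfl
  rw [he, h1, h2, hperm.length_eq]
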